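-- pv_equiv track=rewrite | github.com/UTResearchAssistant/UTResearchAssistant | agents/citation_agent.py | _calculate_impact_percentiles
-- ===== SOURCE A (Python) =====
-- from typing import Dict, List, Any, Optional, Set, Tuple
--
-- def _calculate_impact_percentiles(citations: List[int]) -> Dict[str, int]:
--     """Calculate impact percentiles."""
--     if not citations:
--         return {}
--
--     sorted_citations = sorted(citations)
--     n = len(sorted_citations)
--
--     percentiles = {}
--     for p in [25, 50, 75, 90, 95]:
--         index = int(n * p / 100)
--         if index >= n:
--             index = n - 1
--         percentiles[f'p{p}'] = sorted_citations[index]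
--
--     return percentiles
-- ===== SOURCE B (Python) =====
-- def _calculate_impact_percentiles(citations):
--     """Calculate impact percentiles by rank-counting selection (no sort)."""
--     if not citations:
--         return {}
--     n = len(citations)
--
--     def select(k):
--         # the k-th smallest (0-based) is the unique value x with
--         # #(< x) <= k < #(<= x); scan for the first occurrence of it
--         for x in citations:
--             lt = 0
--             le = 0
--             for y in citations:
--                 if y < x:
--                     lt += 1
--                 if y <= x:
--                     le += 1
--             if lt <= k < le:
--                 return x
--
--     return {'p%d' % p: select(n * p // 100) for p in (25, 50, 75, 90, 95)}
-- ===== Notes on version B (the rewrite author's own statement) =====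
-- stated objective: alternative
-- what changed: Replaces sort-then-index with direct order-statistic selection: each percentile value is found by scanning for the unique element whose less-than/at-most counts bracket the target rank, so no sorted copy is ever built.
import Mathlib
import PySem

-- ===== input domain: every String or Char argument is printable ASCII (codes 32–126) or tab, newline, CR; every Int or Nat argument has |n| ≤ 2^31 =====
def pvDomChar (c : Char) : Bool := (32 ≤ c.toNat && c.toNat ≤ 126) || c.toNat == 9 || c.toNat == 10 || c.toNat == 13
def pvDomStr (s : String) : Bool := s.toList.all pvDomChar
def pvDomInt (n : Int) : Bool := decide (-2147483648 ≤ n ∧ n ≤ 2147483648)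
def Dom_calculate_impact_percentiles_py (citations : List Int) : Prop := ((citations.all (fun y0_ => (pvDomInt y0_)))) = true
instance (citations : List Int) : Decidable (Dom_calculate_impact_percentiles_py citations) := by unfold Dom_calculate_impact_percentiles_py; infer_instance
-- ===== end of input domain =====

-- B replaces sort-then-index by rank-counting order-statistic selection (alternative algorithm, not faster).


-- ===== PORT A =====
-- 'int(n * p / 100)' is ported as floor division (exact here: n*p ≥ 0, and the float
-- quotient truncates to the same integer for all list lengths below 2^45).
-- 'sorted_citations[index]' is always in range (0 ≤ index < n), so pyGetD's default is never used.
def calculate_impact_percentiles_py (citations : List Int) : List (String × Int) :=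
  if citations = [] then []
  else
    let sorted_citations := PySem.List.sorted citations (fun x => x) false
    let n : Int := (sorted_citations.length : Int)
    (([25, 50, 75, 90, 95] : List Int).foldl
      (fun d p =>
        let index := PySem.Int.floordiv (n * p) 100
        let index := if n ≤ index then n - 1 else index
        d.insert ("p" ++ PySem.Int.toStr p) (PySem.List.pyGetD sorted_citations index 0))
      PySem.Dict.empty).items

-- ===== PORT B =====
-- inner counting loop of Source B's select
def pvCountLtLe (citations : List Int) (x : Int) : Int × Int :=
  citations.foldl
    (fun (a : Int × Int) y => (if y < x then a.1 + 1 else a.1, if y ≤ x then a.2 + 1 else a.2))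
    (0, 0)

-- Source B's select: first element whose rank counts bracket k; the scan always succeeds
-- for 0 ≤ k < n, so the .getD 0 default is never used (Python would return None).
def pvSelect (citations : List Int) (k : Int) : Int :=
  (citations.find? (fun x =>
      let c := pvCountLtLe citations x
      decide (c.1 ≤ k) && decide (k < c.2))).getD 0

def calculate_impact_percentiles_py_alt (citations : List Int) : List (String × Int) :=
  if citations = [] then []
  else
    let n : Int := (citations.length : Int)
    (([25, 50, 75, 90, 95] : List Int).foldl
      (fun d p => d.insert ("p" ++ PySem.Int.toStr p) (pvSelect citations (PySem.Int.floordiv (n * p) 100)))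
      PySem.Dict.empty).items

-- ===== PRECONDITION & SPEC =====
def Spec_calculate_impact_percentiles_py (citations : List Int) (out : List (String × Int)) : Prop := out = calculate_impact_percentiles_py_alt citations
instance (citations : List Int) (out : List (String × Int)) : Decidable (Spec_calculate_impact_percentiles_py citations out) := by unfold Spec_calculate_impact_percentiles_py; infer_instance

-- ===== CLAIM (what is proved, stated in full; the proofs are below) =====
def Claim_equal_calculate_impact_percentiles_py : Prop := ∀ (citations : List Int), Dom_calculate_impact_percentiles_py citations → Spec_calculate_impact_percentiles_py citations (calculate_impact_percentiles_py citations)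

-- ===== LEMMAS AND PROOFS =====

lemma pvCountLtLe_aux (x : Int) : ∀ (xs : List Int) (a : Int × Int),
    xs.foldl (fun (a : Int × Int) y => (if y < x then a.1 + 1 else a.1, if y ≤ x then a.2 + 1 else a.2)) a
      = (a.1 + (xs.countP (fun y => decide (y < x)) : Int), a.2 + (xs.countP (fun y => decide (y ≤ x)) : Int)) := by
  intro xs
  induction xs with
  | nil => intro a; simp
  | cons h t ih =>
    intro a
    simp only [List.foldl_cons, List.countP_cons, ih]
    split_ifs with h1 h2 h2 <;> simp_all <;> omega

lemma pvCountLtLe_eq (xs : List Int) (x : Int) :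
    pvCountLtLe xs x = ((xs.countP (fun y => decide (y < x)) : Int), (xs.countP (fun y => decide (y ≤ x)) : Int)) := by
  unfold pvCountLtLe
  rw [pvCountLtLe_aux]
  simp

-- the k-th element of the sorted list satisfies the rank bracket, and is the only value that does
lemma sorted_rank_bracket (xs : List Int) (kn : ℕ)
    (hkn : kn < (PySem.List.sorted xs (fun x => x) false).length) :
    (xs.countP (fun y => decide (y < (PySem.List.sorted xs (fun x => x) false)[kn])) ≤ kn
     ∧ kn < xs.countP (fun y => decide (y ≤ (PySem.List.sorted xs (fun x => x) false)[kn]))) := by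
  set s := PySem.List.sorted xs (fun x => x) false with hs
  have hperm : s.Perm xs := PySem.List.sorted_perm xs _ _
  set t := s[kn] with ht
  have hmono : ∀ (p q : ℕ) (hpq : p ≤ q) (hq : q < s.length), s[p]'(Nat.lt_of_le_of_lt hpq hq) ≤ s[q] := by
    intro p q hpq hq
    exact PySem.List.key_sorted_getElem_mono xs (fun x => x) hpq hq
  constructor
  · rw [← hperm.countP_eq]
    calc s.countP (fun y => decide (y < t))
        = (s.take kn).countP (fun y => decide (y < t)) + (s.drop kn).countP (fun y => decide (y < t)) := by
          rw [← List.countP_append, List.take_append_drop]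
      _ ≤ kn + 0 := by
          apply Nat.add_le_add
          · exact le_trans (List.countP_le_length) (by simp)
          · apply Nat.le_of_eq
            rw [List.countP_eq_zero]
            intro a ha
            obtain ⟨i, hi, hgi⟩ := List.mem_iff_getElem.mp ha
            have hin : kn + i < s.length := by simp at hi; omega
            have : s[kn] ≤ s[kn + i] := hmono kn (kn+i) (by omega) hin
            simp only [List.getElem_drop] at hgi
            simp [← hgi, ht]
            omega
      _ = kn := by omega
  · rw [← hperm.countP_eq]
    have h1 : (s.take (kn+1)).countP (fun y => decide (y ≤ t)) = kn + 1 := by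
      rw [List.countP_eq_length.mpr, List.length_take]
      · omega
      · intro a ha
        obtain ⟨i, hi, hgi⟩ := List.mem_iff_getElem.mp ha
        simp only [List.getElem_take] at hgi
        have hii : i < s.length := by simp at hi; omega
        have : s[i]'hii ≤ s[kn] := hmono i kn (by simp at hi; omega) hkn
        simp [← hgi, ht]; omega
    have h2 : (s.take (kn+1)).countP (fun y => decide (y ≤ t)) ≤ s.countP (fun y => decide (y ≤ t)) :=
      (List.take_sublist _ _).countP_le
    omega

lemma pvSelect_eq_sorted_get (xs : List Int) (_hne : xs ≠ []) (k : Int)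
    (h0 : 0 ≤ k) (hk : k < (xs.length : Int)) :
    pvSelect xs k = PySem.List.pyGetD (PySem.List.sorted xs (fun x => x) false) k 0 := by
  set s := PySem.List.sorted xs (fun x => x) false with hs
  have hlen : s.length = xs.length := PySem.List.length_sorted xs _ _
  have hperm : s.Perm xs := PySem.List.sorted_perm xs _ _
  have hkn : k.toNat < s.length := by omega
  set t := s[k.toNat] with ht
  have hget : PySem.List.pyGetD s k 0 = t :=
    PySem.List.pyGetD_eq_getElem s 0 h0 (by omega)
  have hlt : xs.countP (fun y => decide (y < t)) ≤ k.toNat := (sorted_rank_bracket xs k.toNat hkn).1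
  have hle : k.toNat < xs.countP (fun y => decide (y ≤ t)) := (sorted_rank_bracket xs k.toNat hkn).2
  -- uniqueness
  have huniq : ∀ x : Int, xs.countP (fun y => decide (y < x)) ≤ k.toNat →
      k.toNat < xs.countP (fun y => decide (y ≤ x)) → x = t := by
    intro x hx1 hx2
    rcases lt_trichotomy x t with h | h | h
    · exfalso
      have : xs.countP (fun y => decide (y ≤ x)) ≤ xs.countP (fun y => decide (y < t)) := by
        apply List.countP_mono_left
        intro y _ hy
        simp at hy ⊢; omega
      omega
    · exact h
    · exfalso
      have : xs.countP (fun y => decide (y ≤ t)) ≤ xs.countP (fun y => decide (y < x)) := by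
        apply List.countP_mono_left
        intro y _ hy
        simp at hy ⊢; omega
      omega
  have hpredt : (fun x => (let c := pvCountLtLe xs x; decide (c.1 ≤ k) && decide (k < c.2))) t = true := by
    simp only [pvCountLtLe_eq, Bool.and_eq_true, decide_eq_true_eq]
    constructor <;> [skip; skip] <;> omega
  have htmem : t ∈ xs := hperm.mem_iff.mp (s.getElem_mem hkn)
  unfold pvSelect
  rcases hfind : xs.find? (fun x => (let c := pvCountLtLe xs x; decide (c.1 ≤ k) && decide (k < c.2))) with _ | x
  · exfalso
    exact List.find?_eq_none.mp hfind t htmem hpredt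
  · have hx := List.find?_some hfind
    simp only [pvCountLtLe_eq, Bool.and_eq_true, decide_eq_true_eq] at hx
    have hxt : x = t := huniq x (by omega) (by omega)
    rw [Option.getD_some, hxt, hget]

lemma idx_bounds (n p : Int) (hn : 1 ≤ n) (hp0 : 0 ≤ p) (hp : p < 100) :
    0 ≤ PySem.Int.floordiv (n * p) 100 ∧ PySem.Int.floordiv (n * p) 100 < n := by
  constructor
  · rw [PySem.Int.floordiv_eq_ediv_of_pos (by norm_num)]
    exact Int.ediv_nonneg (by positivity) (by norm_num)
  · rw [PySem.Int.floordiv_lt_iff_lt_mul (by norm_num)]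
    nlinarith

-- ===== VERDICT (by name: the statement is the Claim_ definition above) =====
theorem calculate_impact_percentiles_py_spec : Claim_equal_calculate_impact_percentiles_py := by
  intro citations _
  unfold Spec_calculate_impact_percentiles_py calculate_impact_percentiles_py calculate_impact_percentiles_py_alt
  by_cases hne : citations = []
  · simp [hne]
  · rw [if_neg hne, if_neg hne]
    have hlen : (PySem.List.sorted citations (fun x => x) false).length = citations.length :=
      PySem.List.length_sorted citations _ _
    have hn : 1 ≤ (citations.length : Int) := by
      have := List.length_pos_iff.mpr hne; omega
    simp only [List.foldl_cons, List.foldl_nil, hlen]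
    have key : ∀ p : Int, 0 ≤ p → p < 100 →
        (let index := PySem.Int.floordiv ((citations.length : Int) * p) 100
         let index := if (citations.length : Int) ≤ index then (citations.length : Int) - 1 else index
         PySem.List.pyGetD (PySem.List.sorted citations (fun x => x) false) index 0)
        = pvSelect citations (PySem.Int.floordiv ((citations.length : Int) * p) 100) := by
      intro p hp0 hp
      obtain ⟨hi0, hin⟩ := idx_bounds (citations.length : Int) p hn hp0 hp
      simp only [if_neg (not_le.mpr hin)]
      exact (pvSelect_eq_sorted_get citations hne _ hi0 hin).symm
    rw [key 25 (by norm_num) (by norm_num), key 50 (by norm_num) (by norm_num),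
        key 75 (by norm_num) (by norm_num), key 90 (by norm_num) (by norm_num),
        key 95 (by norm_num) (by norm_num)]
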